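-- pv_equiv track=rewrite | github.com/pandas-dev/pandas | .venv/Lib/site-packages/prometheus_client/parser.py | _last_unquoted_char
-- ===== SOURCE A (Python) =====
-- import string
--
-- def _is_character_escaped(s: str, charpos: int) -> bool:
--     num_bslashes = 0
--     while (charpos > num_bslashes
--            and s[charpos - 1 - num_bslashes] == '\\'):
--         num_bslashes += 1
--     return num_bslashes % 2 == 1
--
-- def _last_unquoted_char(text: str, chs: str) -> int:
--     """Return position of last unquoted character in list, or -1 if not found."""
--     i = len(text) - 1
--     in_quotes = False
--     if chs is None:
--         chs = string.whitespace
--     while i > 0: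
--         if text[i] == '"' and not _is_character_escaped(text, i):
--             in_quotes = not in_quotes
--
--         if not in_quotes:
--             if text[i] in chs:
--                 return i
--         i -= 1
--     return -1
-- ===== SOURCE B (Python) =====
-- import string
--
-- def _last_unquoted_char(text: str, chs: str) -> int:
--     """Return position of last unquoted character in list, or -1 if not found."""
--     if chs is None:
--         chs = string.whitespace
--     # one forward pass: esc[i] = parity of the backslash run ending at i-1 is odd
--     esc = []
--     run = 0
--     for c in text:
--         esc.append(run % 2 == 1)
--         run = run + 1 if c == '\\' else 0
--     in_quotes = False
--     for i in range(len(text) - 1, 0, -1):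
--         if text[i] == '"' and not esc[i]:
--             in_quotes = not in_quotes
--         if not in_quotes and text[i] in chs:
--             return i
--     return -1
-- ===== Notes on version B (the rewrite author's own statement) =====
-- stated objective: alternative
-- what changed: A recounts the backslash run behind every quote with an inner backward while-loop (O(n^2) worst case on backslash-heavy text); B precomputes each position's escape parity in one forward pass and then does a single backward scan (O(n) worst case, though with a larger constant on backslash-free text).
import Mathlib
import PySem

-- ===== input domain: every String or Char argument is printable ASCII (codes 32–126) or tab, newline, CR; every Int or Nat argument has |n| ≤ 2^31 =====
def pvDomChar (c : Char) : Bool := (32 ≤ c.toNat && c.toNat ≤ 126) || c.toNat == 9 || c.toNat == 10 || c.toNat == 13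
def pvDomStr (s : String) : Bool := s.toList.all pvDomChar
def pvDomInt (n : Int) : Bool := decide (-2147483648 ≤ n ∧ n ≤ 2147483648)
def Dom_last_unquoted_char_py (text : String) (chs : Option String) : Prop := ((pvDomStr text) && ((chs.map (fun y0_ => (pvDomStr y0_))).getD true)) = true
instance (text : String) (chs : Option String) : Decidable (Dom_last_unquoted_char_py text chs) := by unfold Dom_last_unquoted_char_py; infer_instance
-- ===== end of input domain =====

-- B replaces A's per-position backward backslash recount (quadratic worst case) with one forward pass that
-- precomputes the escape parity of every position, then a single backward scan (objective: alternative; linear worst case, not measured faster on typical inputs).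


-- ===== PORT A =====
-- while (charpos > num_bslashes and s[charpos - 1 - num_bslashes] == '\\'): num_bslashes += 1
def pvEscCount (s : List Char) (charpos : Nat) (num : Nat) : Nat :=
  if _h : num < charpos ∧ s.getD (charpos - 1 - num) ' ' == '\\' then
    pvEscCount s charpos (num + 1)
  else num
termination_by charpos - num
decreasing_by omega

def pvIsCharEscaped (s : List Char) (charpos : Nat) : Bool :=
  pvEscCount s charpos 0 % 2 == 1

-- while i > 0: toggle in_quotes on unescaped '"'; if not in_quotes and text[i] in chs: return i
def pvLoopA (s : List Char) (chs : List Char) (i : Nat) (inq : Bool) : Int :=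
  if i > 0 then
    let inq' := if s.getD i ' ' == '"' && !(pvIsCharEscaped s i) then !inq else inq
    if !inq' && chs.contains (s.getD i ' ') then (i : Int)
    else pvLoopA s chs (i - 1) inq'
  else -1
termination_by i

def last_unquoted_char_py (text : String) (chs : Option String) : Int :=
  let chsL := (chs.getD " \t\n\r\x0b\x0c").toList   -- string.whitespace when chs is None
  pvLoopA text.toList chsL (text.length - 1) false

-- ===== PORT B =====
-- forward pass of Source B: esc[i] = run % 2 == 1, run := run+1 on '\\' else 0
def pvBuildEsc (s : List Char) : List Bool :=
  (s.foldl (fun st c => (st.1 ++ [st.2 % 2 == 1], if c == '\\' then st.2 + 1 else 0))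
    (([] : List Bool), (0 : Nat))).1

-- for i in range(len(text)-1, 0, -1): toggle on unescaped '"' (via esc), return i on match
def pvLoopB (s : List Char) (esc : List Bool) (chs : List Char) (i : Nat) (inq : Bool) : Int :=
  if i > 0 then
    let inq' := if s.getD i ' ' == '"' && !(esc.getD i false) then !inq else inq
    if !inq' && chs.contains (s.getD i ' ') then (i : Int)
    else pvLoopB s esc chs (i - 1) inq'
  else -1
termination_by i

def last_unquoted_char_py_alt (text : String) (chs : Option String) : Int :=
  let chsL := (chs.getD " \t\n\r\x0b\x0c").toList
  pvLoopB text.toList (pvBuildEsc text.toList) chsL (text.length - 1) false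

-- ===== PRECONDITION & SPEC =====
def Spec_last_unquoted_char_py (text : String) (chs : Option String) (out : Int) : Prop := out = last_unquoted_char_py_alt text chs
instance (text : String) (chs : Option String) (out : Int) : Decidable (Spec_last_unquoted_char_py text chs out) := by unfold Spec_last_unquoted_char_py; infer_instance

-- ===== CLAIM (what is proved, stated in full; the proofs are below) =====
def Claim_equal_last_unquoted_char_py : Prop := ∀ (text : String) (chs : Option String), Dom_last_unquoted_char_py text chs → Spec_last_unquoted_char_py text chs (last_unquoted_char_py text chs)

-- ===== LEMMAS AND PROOFS =====

-- length of the maximal backslash prefix of a (reversed) list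
def pvBsRun : List Char → Nat
  | [] => 0
  | c :: rest => if c == '\\' then pvBsRun rest + 1 else 0

theorem pvBsRun_le (r : List Char) : pvBsRun r ≤ r.length := by
  induction r with
  | nil => simp [pvBsRun]
  | cons c rest ih => simp only [pvBsRun, List.length_cons]; split <;> omega

theorem pvBsRun_lt_get (r : List Char) (k : Nat) (hk : k < pvBsRun r) :
    r.getD k ' ' = '\\' := by
  induction r generalizing k with
  | nil => simp [pvBsRun] at hk
  | cons c rest ih =>
    simp only [pvBsRun] at hk
    by_cases hc : c == '\\'
    · simp only [hc, if_pos] at hk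
      cases k with
      | zero => simpa using hc
      | succ k => exact ih k (by omega)
    · simp [hc] at hk

theorem pvBsRun_stop (r : List Char) (h : pvBsRun r < r.length) :
    ¬ (r.getD (pvBsRun r) ' ' == '\\') = true := by
  induction r with
  | nil => simp at h
  | cons c rest ih =>
    simp only [pvBsRun] at *
    by_cases hc : c == '\\'
    · simp only [hc, if_pos] at *
      simpa using ih (by simpa using h)
    · simp [hc]

-- escCount computes pvBsRun of the reversed prefix
theorem pvEscCount_eq (s : List Char) (i : Nat) (hi : i ≤ s.length) (num : Nat)
    (hnum : num ≤ pvBsRun ((s.take i).reverse)) :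
    pvEscCount s i num = pvBsRun ((s.take i).reverse) := by
  set r := (s.take i).reverse with hr
  have hrlen : r.length = i := by simp [hr]; omega
  have hidx : ∀ k, k < i → s.getD (i - 1 - k) ' ' = r.getD k ' ' := by
    intro k hk
    have h2 : i - 1 - k < s.length := by omega
    have h3 : k < r.length := by omega
    rw [List.getD_eq_getElem _ _ h2, List.getD_eq_getElem _ _ h3]
    simp only [hr, List.getElem_reverse, List.getElem_take]
    congr 1
    rw [List.length_take]
    omega
  induction hn : pvBsRun r - num generalizing num with
  | zero =>
    have heq : num = pvBsRun r := by omega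
    rw [pvEscCount]
    split
    · rename_i hcond
      exfalso
      have hlt : pvBsRun r < r.length := by
        rcases hcond with ⟨h1, _⟩; omega
      exact pvBsRun_stop r hlt (by rw [← heq, ← hidx _ (by omega)]; exact hcond.2)
    · omega
  | succ n ih =>
    have hlt : num < pvBsRun r := by omega
    have hkr : num < r.length := by have := pvBsRun_le r; omega
    have hcond : num < i ∧ (s.getD (i - 1 - num) ' ' == '\\') = true := by
      refine ⟨by omega, ?_⟩
      rw [hidx _ (by omega), pvBsRun_lt_get r num hlt]
      simp
    rw [pvEscCount, dif_pos hcond]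
    exact ih (num + 1) (by omega) (by omega)

-- pvBuildEsc fold invariant
theorem pvBuildEsc_spec (s : List Char) :
    ∀ (acc : List Bool) (run : Nat) (pre : List Char),
    run = pvBsRun pre.reverse →
    acc.length = pre.length →
    (∀ k, k < pre.length → acc.getD k false =
        decide (pvBsRun (((pre ++ s).take k).reverse) % 2 = 1)) →
    (let st := s.foldl (fun st c => (st.1 ++ [st.2 % 2 == 1], if c == '\\' then st.2 + 1 else 0)) (acc, run)
    st.1.length = pre.length + s.length ∧
    ∀ k, k < pre.length + s.length → st.1.getD k false =
        decide (pvBsRun (((pre ++ s).take k).reverse) % 2 = 1)) := by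
  induction s with
  | nil =>
    intro acc run pre hrun hlen hval
    refine ⟨by simpa using hlen, ?_⟩
    intro k hk
    exact hval k (by simpa using hk)
  | cons c rest ih =>
    intro acc run pre hrun hlen hval
    simp only [List.foldl_cons]
    have hre : (pre ++ c :: rest) = ((pre ++ [c]) ++ rest) := by simp
    have h1 := ih (acc ++ [run % 2 == 1]) (if c == '\\' then run + 1 else 0) (pre ++ [c])
      (by rw [hrun]
          simp only [List.reverse_append, List.reverse_cons, List.reverse_nil,
            List.nil_append, List.singleton_append, pvBsRun])
      (by simp [hlen])
      (by intro k hk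
          simp only [List.length_append, List.length_cons, List.length_nil] at hk
          by_cases hkp : k < pre.length
          · rw [List.getD_append _ _ _ _ (by omega)]
            rw [hval k hkp]
            have he : (pre ++ [c]) ++ rest = pre ++ c :: rest := by simp
            rw [he]
          · have hkeq : k = pre.length := by omega
            subst hkeq
            rw [List.getD_append_right _ _ _ _ (by omega)]
            simp only [hlen, Nat.sub_self, List.getD_cons_zero]
            rw [hrun]
            congr 1
            rw [List.take_append_of_le_length (by simp),
                List.take_append_of_le_length (by omega), List.take_length])
    refine ⟨?_, ?_⟩
    · rw [h1.1]; simp only [List.length_append, List.length_cons, List.length_nil]; omega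
    · intro k hk
      rw [hre]
      exact h1.2 k (by simp only [List.length_append, List.length_cons, List.length_nil] at hk ⊢; omega)

theorem pvBuildEsc_getD (s : List Char) (i : Nat) (hi : i < s.length) :
    (pvBuildEsc s).getD i false = pvIsCharEscaped s i := by
  have h := pvBuildEsc_spec s [] 0 [] (by simp [pvBsRun]) (by simp) (by simp)
  simp only [List.nil_append, List.length_nil, Nat.zero_add] at h
  rw [pvBuildEsc, h.2 i hi]
  rw [pvIsCharEscaped, pvEscCount_eq s i (by omega) 0 (by omega)]
  rcases Nat.mod_two_eq_zero_or_one (pvBsRun ((List.take i s).reverse)) with he | he <;> simp [he]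

theorem pvLoop_eq (s : List Char) (chs : List Char) (i : Nat) (inq : Bool) :
    pvLoopB s (pvBuildEsc s) chs i inq = pvLoopA s chs i inq := by
  induction i using Nat.strong_induction_on generalizing inq with
  | _ i ih =>
    rw [pvLoopA, pvLoopB]
    by_cases hi : i > 0
    · rw [if_pos hi, if_pos hi]
      have hesc : (if s.getD i ' ' == '"' && !((pvBuildEsc s).getD i false) then !inq else inq)
          = (if s.getD i ' ' == '"' && !(pvIsCharEscaped s i) then !inq else inq) := by
        cases hq : (s.getD i ' ' == '"') with
        | false => simp only [Bool.false_and]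
        | true =>
          have hilen : i < s.length := by
            by_contra hn
            have hd : s.getD i ' ' = ' ' := List.getD_eq_default _ _ (by omega)
            rw [hd] at hq; simp at hq
          rw [pvBuildEsc_getD s i hilen]
      rw [hesc]
      by_cases hc : (!(if s.getD i ' ' == '"' && !(pvIsCharEscaped s i) then !inq else inq)
          && chs.contains (s.getD i ' ')) = true
      · rw [if_pos hc, if_pos hc]
      · rw [if_neg hc, if_neg hc]
        exact ih (i - 1) (by omega) _
    · rw [if_neg hi, if_neg hi]

-- ===== VERDICT (by name: the statement is the Claim_ definition above) =====
theorem last_unquoted_char_py_spec : Claim_equal_last_unquoted_char_py := by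
  intro text chs _
  unfold Spec_last_unquoted_char_py last_unquoted_char_py last_unquoted_char_py_alt
  exact (pvLoop_eq text.toList _ (text.length - 1) false).symm
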